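-- pv_equiv track=rewrite | github.com/Metastasis/torcheck | track/client_log.py | find_first_arrived
-- ===== SOURCE A (Python) =====
-- def find_first_arrived(data):
--     copy = data.copy()
--     copy.reverse()
--     first_marked = next((k for k, v in enumerate(copy) if v[1] == 1), None)
--     if first_marked is None and len(data):
--         return len(data) - 1
--     if not len(data):
--         return None
--     search_from = len(data) - first_marked
--     rest_unmarked = data[search_from:]
--     first_arrived_idx = next((k for k, v in enumerate(rest_unmarked) if v[1] == 0), None)
--     if first_arrived_idx is None:
--         return None
--     return search_from + first_arrived_idx
-- ===== SOURCE B (Python) =====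
-- def find_first_arrived(data):
--     saw_mark = False
--     candidate = None
--     for i, (_, v) in enumerate(data):
--         if v == 1:
--             saw_mark = True
--             candidate = None
--         elif v == 0 and candidate is None:
--             candidate = i
--     if not data:
--         return None
--     if not saw_mark:
--         return len(data) - 1
--     return candidate
-- ===== Notes on version B (the rewrite author's own statement) =====
-- stated objective: simpler
-- what changed: Replaces A's reverse-copy + generator scan for the last mark + slice + second scan with a single forward pass keeping (saw_mark, candidate), resetting the candidate at every mark.
import Mathlib
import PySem

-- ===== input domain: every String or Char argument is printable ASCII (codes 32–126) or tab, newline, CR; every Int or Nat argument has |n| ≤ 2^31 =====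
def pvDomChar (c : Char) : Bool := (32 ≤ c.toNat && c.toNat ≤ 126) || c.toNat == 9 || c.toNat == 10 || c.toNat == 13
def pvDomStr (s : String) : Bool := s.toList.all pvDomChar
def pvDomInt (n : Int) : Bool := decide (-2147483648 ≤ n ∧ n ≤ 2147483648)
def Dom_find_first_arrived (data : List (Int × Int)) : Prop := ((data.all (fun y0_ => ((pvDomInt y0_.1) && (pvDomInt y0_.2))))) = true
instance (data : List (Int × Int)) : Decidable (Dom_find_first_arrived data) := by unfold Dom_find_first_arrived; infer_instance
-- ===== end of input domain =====

-- B replaces A's reverse-copy + slice + two generator scans by one forward stateful pass (same cost class; simpler decomposition). Return-value equivalence only (A copies before reversing, so neither mutates).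

-- ===== PORT A =====
def find_first_arrived (data : List (Int × Int)) : Option Int :=
  let copy := data.reverse
  let first_marked := ((PySem.List.enumerate copy 0).find? (fun kv => kv.2.2 == 1)).map (·.1)
  match first_marked with
  | none => if data.length ≠ 0 then some ((data.length : Int) - 1) else none
  | some fm =>
    if data.length = 0 then none
    else
      let search_from : Int := (data.length : Int) - fm
      let rest_unmarked := PySem.List.slice data (some search_from) none
      match (PySem.List.enumerate rest_unmarked 0).find? (fun kv => kv.2.2 == 0) with
      | none => none
      | some kv => some (search_from + kv.1)

-- ===== PORT B =====
def ffaStep (st : Bool × Option Int) (kv : Int × (Int × Int)) : Bool × Option Int :=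
  if kv.2.2 == 1 then (true, none)
  else if kv.2.2 == 0 && st.2.isNone then (st.1, some kv.1)
  else st

def find_first_arrived_alt (data : List (Int × Int)) : Option Int :=
  let st := (PySem.List.enumerate data 0).foldl ffaStep (false, none)
  if data.length = 0 then none
  else if st.1 = false then some ((data.length : Int) - 1)
  else st.2

-- ===== PRECONDITION & SPEC =====
def Spec_find_first_arrived (data : List (Int × Int)) (out : Option Int) : Prop := out = find_first_arrived_alt data
instance (data : List (Int × Int)) (out : Option Int) : Decidable (Spec_find_first_arrived data out) := by unfold Spec_find_first_arrived; infer_instance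

-- ===== CLAIM (what is proved, stated in full; the proofs are below) =====
def Claim_equal_find_first_arrived : Prop := ∀ (data : List (Int × Int)), Dom_find_first_arrived data → Spec_find_first_arrived data (find_first_arrived data)

-- ===== LEMMAS AND PROOFS =====

-- the index part of the first enumerate hit is findIdx?, shifted by the start
theorem enum_find_fst (p : Int × Int → Bool) (xs : List (Int × Int)) (s : Int) :
    ((PySem.List.enumerate xs s).find? (fun kv => p kv.2)).map (·.1)
      = (xs.findIdx? p).map (fun (k : Nat) => s + (k : Int)) := by
  induction xs generalizing s with
  | nil => simp [PySem.List.enumerate_nil]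
  | cons x xs ih =>
    rw [PySem.List.enumerate_cons, List.find?_cons, List.findIdx?_cons]
    by_cases h : p x
    · simp [h]
    · simp only [h, Bool.false_eq_true, ite_false, ih (s + 1)]
      cases xs.findIdx? p
      · simp
      · simp
        ring

-- the candidate B's fold carries, as a closed form
def ffaCand (data : List (Int × Int)) : Option Int :=
  match data.reverse.findIdx? (fun v => v.2 == 1) with
  | none => (data.findIdx? (fun v => v.2 == 0)).map (fun (k : Nat) => (k : Int))
  | some fm =>
      ((data.drop (data.length - fm)).findIdx? (fun v => v.2 == 0)).map
        (fun (k : Nat) => ((data.length - fm : Nat) : Int) + k)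

theorem ffa_fold_char (data : List (Int × Int)) :
    (PySem.List.enumerate data 0).foldl ffaStep (false, none)
      = (data.any (fun v => v.2 == 1), ffaCand data) := by
  induction data using List.reverseRecOn with
  | nil => simp [PySem.List.enumerate_nil, ffaCand]
  | append_singleton xs x ih =>
    rw [PySem.List.enumerate_append, List.foldl_append, ih]
    have hrev : (xs ++ [x]).reverse = x :: xs.reverse := by simp
    by_cases hx1 : x.2 == 1
    · -- the mark resets the candidate
      simp only [PySem.List.enumerate_cons, PySem.List.enumerate_nil, List.foldl_cons,
        List.foldl_nil, ffaStep, hx1, if_pos]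
      have : ffaCand (xs ++ [x]) = none := by
        unfold ffaCand
        rw [hrev, List.findIdx?_cons, if_pos hx1]
        simp
      rw [this]
      simp [List.any_append, hx1]
    · -- not a mark: candidate possibly filled
      have hfm : (xs ++ [x]).reverse.findIdx? (fun v => v.2 == 1)
          = (xs.reverse.findIdx? (fun v => v.2 == 1)).map (fun i => i + 1) := by
        rw [hrev, List.findIdx?_cons, if_neg (by simpa using hx1)]
      have hany : (xs ++ [x]).any (fun v => v.2 == 1) = xs.any (fun v => v.2 == 1) := by
        simp [List.any_append, hx1]
      simp only [PySem.List.enumerate_cons, PySem.List.enumerate_nil, List.foldl_cons,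
        List.foldl_nil, ffaStep, hx1, Bool.false_eq_true, ite_false]
      cases hprev : xs.reverse.findIdx? (fun v => v.2 == 1) with
      | none =>
        have hcnew : ffaCand (xs ++ [x])
            = ((xs ++ [x]).findIdx? (fun v => v.2 == 0)).map (fun (k : Nat) => (k : Int)) := by
          unfold ffaCand; rw [hfm, hprev]; simp
        have hcold : ffaCand xs = (xs.findIdx? (fun v => v.2 == 0)).map (fun (k : Nat) => (k : Int)) := by
          unfold ffaCand; rw [hprev]
        rw [hcnew, hcold, hany, List.findIdx?_append]
        cases hfi : xs.findIdx? (fun v => v.2 == 0) with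
        | some k => simp
        | none =>
          by_cases hx0 : x.2 == 0
          · simp [List.findIdx?_cons, hx0]
          · simp [List.findIdx?_cons, hx0]
      | some fm =>
        have hfmlt : fm < xs.reverse.length := (List.findIdx?_eq_some_iff_findIdx_eq.mp hprev).1
        have hfmlt' : fm < xs.length := by simpa using hfmlt
        have hsf : (xs ++ [x]).length - (fm + 1) = xs.length - fm := by
          simp
        have hdrop : (xs ++ [x]).drop (xs.length - fm) = xs.drop (xs.length - fm) ++ [x] := by
          rw [List.drop_append_of_le_length (by omega)]
        have hlen : (xs.drop (xs.length - fm)).length = fm := by simp; omega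
        have hcnew : ffaCand (xs ++ [x])
            = (((xs.drop (xs.length - fm) ++ [x]).findIdx? (fun v => v.2 == 0)).map
                (fun (k : Nat) => ((xs.length - fm : Nat) : Int) + k)) := by
          unfold ffaCand; rw [hfm, hprev]; simp only [Option.map_some, hsf, hdrop]
        have hcold : ffaCand xs
            = ((xs.drop (xs.length - fm)).findIdx? (fun v => v.2 == 0)).map
                (fun (k : Nat) => ((xs.length - fm : Nat) : Int) + k) := by
          unfold ffaCand; rw [hprev]
        rw [hcnew, hcold, hany, List.findIdx?_append]
        cases hfi : (xs.drop (xs.length - fm)).findIdx? (fun v => v.2 == 0) with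
        | some k => simp
        | none =>
          by_cases hx0 : x.2 == 0
          · simp only [hfi, Option.or, List.findIdx?_cons, hx0, if_pos, List.findIdx?_nil,
              Option.map_none, Option.map_some, hlen]
            rw [if_pos (by simp)]
            have h9 : (0 : Int) + ↑xs.length = ((xs.length - fm : Nat) : Int) + ((0 + fm : Nat) : Int) := by
              omega
            rw [h9]
          · simp [List.findIdx?_cons, hx0]

theorem ffa_main (data : List (Int × Int)) :
    find_first_arrived data = find_first_arrived_alt data := by
  simp only [find_first_arrived, find_first_arrived_alt]
  rw [ffa_fold_char]
  rw [enum_find_fst (fun v => v.2 == 1) data.reverse 0]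
  cases hfm : data.reverse.findIdx? (fun v => v.2 == 1) with
  | none =>
    have hall : ∀ v ∈ data, (v.2 == 1) = false := by
      intro v hv
      exact List.findIdx?_eq_none_iff.mp hfm v (by simpa using hv)
    have hany : data.any (fun v => v.2 == 1) = false := by
      simp only [List.any_eq_false]
      intro v hv; simp [hall v hv]
    simp only [Option.map_none, hany]
    by_cases h0 : data.length = 0
    · simp [h0]
    · simp [h0]
  | some fm =>
    have hfmlt : fm < data.reverse.length := (List.findIdx?_eq_some_iff_findIdx_eq.mp hfm).1
    have hfmlt' : fm < data.length := by simpa using hfmlt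
    have hne : data.length ≠ 0 := by omega
    have hmem : ∃ v ∈ data, (v.2 == 1) = true := by
      have hidx : List.findIdx (fun v => v.2 == 1) data.reverse = fm :=
        (List.findIdx?_eq_some_iff_findIdx_eq.mp hfm).2
      have hp : ((data.reverse[fm]'hfmlt).2 == 1) = true := by
        have h := List.findIdx_getElem (p := fun v => v.2 == 1) (xs := data.reverse)
          (w := by rw [hidx]; exact hfmlt)
        simpa [hidx] using h
      exact ⟨data.reverse[fm]'hfmlt, by simp, hp⟩
    have hany : data.any (fun v => v.2 == 1) = true := List.any_eq_true.mpr (by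
      obtain ⟨v, hv, hp⟩ := hmem; exact ⟨v, hv, hp⟩)
    have hsf0 : (0 : Int) ≤ (data.length : Int) - (0 + (fm : Int)) := by omega
    have hslice : PySem.List.slice data (some ((data.length : Int) - (0 + (fm : Int)))) none
        = data.drop (data.length - fm) := by
      rw [PySem.List.slice_from data hsf0]
      congr 1
      omega
    simp only [Option.map_some, hany, if_neg hne, ite_false, Bool.true_eq_false]
    rw [hslice]
    have hcand : ffaCand data = ((data.drop (data.length - fm)).findIdx? (fun v => v.2 == 0)).map
        (fun (k : Nat) => ((data.length - fm : Nat) : Int) + k) := by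
      unfold ffaCand; rw [hfm]
    rw [hcand]
    have hmap := enum_find_fst (fun v => v.2 == 0) (data.drop (data.length - fm)) 0
    cases hfind : List.find? (fun kv => kv.2.2 == 0) (PySem.List.enumerate (data.drop (data.length - fm))) with
    | none =>
      rw [hfind] at hmap
      cases hfi : (data.drop (data.length - fm)).findIdx? (fun v => v.2 == 0) with
      | none => simp
      | some k => rw [hfi] at hmap; simp at hmap
    | some kv =>
      rw [hfind] at hmap
      cases hfi : (data.drop (data.length - fm)).findIdx? (fun v => v.2 == 0) with
      | none => rw [hfi] at hmap; simp at hmap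
      | some k =>
        rw [hfi] at hmap
        simp only [Option.map_some, Option.some.injEq] at hmap
        simp only [Option.map_some]
        have hk : kv.1 = 0 + (k : Int) := hmap
        congr 1
        omega

-- ===== VERDICT (by name: the statement is the Claim_ definition above) =====
theorem find_first_arrived_spec : Claim_equal_find_first_arrived := by
  intro data _
  unfold Spec_find_first_arrived
  exact ffa_main data
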